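-- pv_equiv track=rewrite | github.com/jinxueyu/keras-models | src/main/py/nlp/corpus/reader.py | parse_seg
-- ===== SOURCE A (Python) =====
-- def parse_seg(line):
--     """convert segment data to lac data format"""
--     tags = []
--     words = line.strip().split()
--
--     for word in words:
--         if len(word) == 1:
--             tags.append('-S')
--         else:
--             tags += ['-B'] + ['-I'] * (len(word) - 2) + ['-E']
--
--     return "".join(words), tags
-- ===== SOURCE B (Python) =====
-- def parse_seg(line):
--     """convert segment data to lac data format"""
--     chars = []
--     tags = []
--     n = len(line)
--     prev_space = True
--     for i, c in enumerate(line):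
--         if c.isspace():
--             prev_space = True
--             continue
--         next_space = i + 1 >= n or line[i + 1].isspace()
--         if prev_space and next_space:
--             tags.append('-S')
--         elif prev_space:
--             tags.append('-B')
--         elif next_space:
--             tags.append('-E')
--         else:
--             tags.append('-I')
--         chars.append(c)
--         prev_space = False
--     return ''.join(chars), tags
-- ===== Notes on version B (the rewrite author's own statement) =====
-- stated objective: alternative
-- what changed: B never splits the line into words: it is a single character-level state machine over the raw line that classifies each non-space character by its whitespace context (previous-space flag and one-character lookahead), collecting the joined characters and the BIES tags in one pass, instead of A's strip/split followed by per-word tag-list arithmetic.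
import Mathlib
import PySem

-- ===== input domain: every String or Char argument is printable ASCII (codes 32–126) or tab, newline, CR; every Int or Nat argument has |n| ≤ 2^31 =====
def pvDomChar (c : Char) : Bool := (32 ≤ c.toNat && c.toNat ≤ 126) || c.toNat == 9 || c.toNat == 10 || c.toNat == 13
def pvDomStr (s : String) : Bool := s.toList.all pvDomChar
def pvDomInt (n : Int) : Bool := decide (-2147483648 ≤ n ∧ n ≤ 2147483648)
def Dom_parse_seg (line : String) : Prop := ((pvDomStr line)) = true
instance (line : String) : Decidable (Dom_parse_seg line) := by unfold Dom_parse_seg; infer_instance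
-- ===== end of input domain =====

-- B replaces A's strip/split + per-word tag-list arithmetic by one character-level state
-- machine over the raw line (previous-space flag + one-char lookahead); alternative, same cost.

-- ===== PORT A =====
def parse_seg (line : String) : String × List String :=
  let words := PySem.Str.split₀ (PySem.Str.strip line)
  let tags := words.foldl (fun tags word =>
    if PySem.Str.len word = 1 then
      tags ++ ["-S"]
    else
      tags ++ (["-B"] ++ List.replicate (PySem.Str.len word - 2).toNat "-I" ++ ["-E"])) []
  (PySem.Str.join "" words, tags)

-- ===== PORT B =====
-- B's loop body: one step of the state machine, st = (collected chars, tags, prev_space),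
-- p = (i, c) from enumerate(line); lookahead line[i+1] via pyGet?
def pvStepB (cs : List Char) (n : Int) (st : List Char × List String × Bool)
    (p : Int × Char) : List Char × List String × Bool :=
  let i := p.1
  let c := p.2
  if PySem.Chars.isspace c then (st.1, st.2.1, true)
  else
    let nextSpace := decide (i + 1 ≥ n) ||
      ((PySem.List.pyGet? cs (i + 1)).map PySem.Chars.isspace).getD false
    let tag := if st.2.2 && nextSpace then "-S"
               else if st.2.2 then "-B"
               else if nextSpace then "-E"
               else "-I"
    (st.1 ++ [c], st.2.1 ++ [tag], false)

def parse_seg_alt (line : String) : String × List String :=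
  let cs := line.toList
  let n := PySem.Str.len line
  let st := (PySem.List.enumerate cs 0).foldl (pvStepB cs n) ([], [], true)
  (String.ofList st.1, st.2.1)

-- ===== PRECONDITION & SPEC =====
def Spec_parse_seg (line : String) (out : String × List String) : Prop := out = parse_seg_alt line
instance (line : String) (out : String × List String) : Decidable (Spec_parse_seg line out) := by unfold Spec_parse_seg; infer_instance

-- ===== CLAIM (what is proved, stated in full; the proofs are below) =====
def Claim_equal_parse_seg : Prop := ∀ (line : String), Dom_parse_seg line → Spec_parse_seg line (parse_seg line)

-- ===== LEMMAS AND PROOFS =====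

-- A's per-word tag pattern, on char lists
def pvPat (w : List Char) : List String :=
  if w.length = 1 then ["-S"] else "-B" :: (List.replicate (w.length - 2) "-I" ++ ["-E"])

-- the state machine B runs, written as structural recursion (lookahead = head of the rest)
def pvM : List Char → Bool → List Char × List String
  | [], _ => ([], [])
  | c :: rest, prev =>
    if PySem.Chars.isspace c then pvM rest true
    else
      let nx := match rest with | [] => true | d :: _ => PySem.Chars.isspace d
      let t := if prev && nx then "-S" else if prev then "-B" else if nx then "-E" else "-I"
      (c :: (pvM rest false).1, t :: (pvM rest false).2)

-- rest empty or starting with whitespace (the state after a completed word)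
def pvHeadWS : List Char → Prop
  | [] => True
  | d :: _ => PySem.Chars.isspace d = true

-- B's fold over enumerate equals the machine pvM, for any suffix at its true offset
theorem pv_fold_eq_M (cs : List Char) : ∀ (ss pre : List Char), cs = pre ++ ss →
    ∀ (out : List Char) (tags : List String) (prev : Bool), ∃ b : Bool,
    (PySem.List.enumerate ss (pre.length : Int)).foldl
      (pvStepB cs (cs.length : Int)) (out, tags, prev)
    = (out ++ (pvM ss prev).1, tags ++ (pvM ss prev).2, b) := by
  intro ss
  induction ss with
  | nil =>
    intro pre hcs out tags prev
    exact ⟨prev, by simp [pvM]⟩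
  | cons c rest ih =>
    intro pre hcs out tags prev
    rw [PySem.List.enumerate_cons, List.foldl_cons]
    by_cases hs : PySem.Chars.isspace c
    · have hstep : pvStepB cs (cs.length : Int) (out, tags, prev) ((pre.length : Int), c)
          = (out, tags, true) := by simp [pvStepB, hs]
      have hcs' : cs = (pre ++ [c]) ++ rest := by simp [hcs]
      obtain ⟨b, hb⟩ := ih (pre ++ [c]) hcs' out tags true
      refine ⟨b, ?_⟩
      have hM : pvM (c :: rest) prev = pvM rest true := by simp [pvM, hs]
      have hpre : ((pre.length : Int) + 1) = (((pre ++ [c]).length : Nat) : Int) := by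
        push_cast; simp
      rw [hstep, hM, hpre]
      exact hb
    · have hsf : PySem.Chars.isspace c = false := by simpa using hs
      cases rest with
      | nil =>
        have hn : (cs.length : Int) = (pre.length : Int) + 1 := by
          rw [hcs]; simp
        refine ⟨false, ?_⟩
        have hge : decide ((pre.length : Int) + 1 ≥ (cs.length : Int)) = true := by
          simp [hn]
        simp [pvStepB, pvM, hsf, hge]
      | cons d r =>
        have hget : PySem.List.pyGet? cs ((pre.length : Int) + 1) = some d := by
          have hc : ((pre.length : Int) + 1) = (((pre.length + 1 : Nat) : Nat) : Int) := by
            push_cast; ring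
          rw [hc, PySem.List.pyGet?_natCast, hcs]
          rw [List.getElem?_append_right (by simp)]
          simp
        have hlt : ¬ ((pre.length : Int) + 1 ≥ (cs.length : Int)) := by
          rw [hcs]
          push_cast [List.length_append, List.length_cons]
          omega
        have hcs' : cs = (pre ++ [c]) ++ (d :: r) := by simp [hcs]
        obtain ⟨b, hb⟩ := ih (pre ++ [c]) hcs'
          (out ++ [c])
          (tags ++ [if prev = true ∧ PySem.Chars.isspace d = true then "-S"
                    else if prev = true then "-B"
                    else if PySem.Chars.isspace d = true then "-E"
                    else "-I"]) false
        refine ⟨b, ?_⟩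
        have hstep : pvStepB cs (cs.length : Int) (out, tags, prev) ((pre.length : Int), c)
            = (out ++ [c],
               tags ++ [if prev = true ∧ PySem.Chars.isspace d = true then "-S"
                        else if prev = true then "-B"
                        else if PySem.Chars.isspace d = true then "-E"
                        else "-I"], false) := by
          simp [pvStepB, hsf, hget, decide_eq_false hlt]
        have hpre : ((pre.length : Int) + 1) = (((pre ++ [c]).length : Nat) : Int) := by
          push_cast; simp
        rw [hstep, hpre, hb]
        have hM : pvM (c :: d :: r) prev
            = (c :: (pvM (d :: r) false).1,
               (if prev = true ∧ PySem.Chars.isspace d = true then "-S"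
                else if prev = true then "-B"
                else if PySem.Chars.isspace d = true then "-E"
                else "-I") :: (pvM (d :: r) false).2) := by
          simp [pvM, hsf]
        rw [hM]
        simp

-- ---- split₀.go bookkeeping ----

theorem pv_go_acc (cs : List Char) : ∀ (cur : List Char) (acc : List (List Char)),
    PySem.Chars.split₀.go cs cur acc = acc.reverse ++ PySem.Chars.split₀.go cs cur [] := by
  induction cs with
  | nil =>
    intro cur acc
    by_cases h : cur.isEmpty <;> simp [PySem.Chars.split₀.go, h]
  | cons c rest ih =>
    intro cur acc
    by_cases hs : PySem.Chars.isspace c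
    · by_cases h : cur.isEmpty
      · simp only [PySem.Chars.split₀.go, hs, h, if_true]
        exact ih [] acc
      · simp only [PySem.Chars.split₀.go, hs, h, if_true, if_false, Bool.false_eq_true]
        rw [ih [] (cur.reverse :: acc), ih [] [cur.reverse]]
        simp
    · simp only [PySem.Chars.split₀.go, hs, if_false, Bool.false_eq_true]
      exact ih (c :: cur) acc

theorem pv_go_word (w : List Char) (hw : ∀ c ∈ w, PySem.Chars.isspace c = false) :
    ∀ (rest cur : List Char) (acc : List (List Char)),
    PySem.Chars.split₀.go (w ++ rest) cur acc = PySem.Chars.split₀.go rest (w.reverse ++ cur) acc := by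
  revert hw
  induction w with
  | nil => intro _ rest cur acc; simp
  | cons c m ih =>
    intro hw rest cur acc
    have hc : PySem.Chars.isspace c = false := hw c (by simp)
    simp only [List.cons_append, PySem.Chars.split₀.go, hc, if_false, Bool.false_eq_true]
    rw [ih (fun d hd => hw d (by simp [hd])) rest (c :: cur) acc]
    simp

theorem pv_go_spaces (t : List Char) (ht : ∀ c ∈ t, PySem.Chars.isspace c = true) :
    ∀ (cur : List Char) (acc : List (List Char)),
    PySem.Chars.split₀.go t cur acc = PySem.Chars.split₀.go [] cur acc := by
  revert ht
  induction t with
  | nil => intro _ cur acc; rfl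
  | cons c t' ih =>
    intro ht cur acc
    have hc : PySem.Chars.isspace c = true := ht c (by simp)
    have ht' : ∀ d ∈ t', PySem.Chars.isspace d = true := fun d hd => ht d (by simp [hd])
    by_cases h : cur.isEmpty
    · simp only [PySem.Chars.split₀.go, hc, h, if_true]
      rw [ih ht' [] acc]
      have hcur : cur = [] := by simpa [List.isEmpty_iff] using h
      simp [PySem.Chars.split₀.go]
    · simp only [PySem.Chars.split₀.go, hc, h, if_true, if_false, Bool.false_eq_true]
      rw [ih ht' [] (cur.reverse :: acc)]
      simp [PySem.Chars.split₀.go]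

theorem pv_go_append_spaces (xs : List Char) (t : List Char)
    (ht : ∀ c ∈ t, PySem.Chars.isspace c = true) :
    ∀ (cur : List Char) (acc : List (List Char)),
    PySem.Chars.split₀.go (xs ++ t) cur acc = PySem.Chars.split₀.go xs cur acc := by
  induction xs with
  | nil =>
    intro cur acc
    simpa using pv_go_spaces t ht cur acc
  | cons c xs' ih =>
    intro cur acc
    by_cases hs : PySem.Chars.isspace c <;>
      by_cases h : cur.isEmpty <;>
      simp only [List.cons_append, PySem.Chars.split₀.go, hs, h, if_true, if_false,
        Bool.false_eq_true] <;>
      apply ih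

theorem pv_split₀_strip (cs : List Char) :
    PySem.Chars.split₀ (PySem.Chars.strip cs) = PySem.Chars.split₀ cs := by
  have hl : ∀ ds : List Char,
      PySem.Chars.split₀ (PySem.Chars.lstrip ds) = PySem.Chars.split₀ ds := by
    intro ds
    induction ds with
    | nil => rfl
    | cons c rest ih =>
      by_cases hs : PySem.Chars.isspace c
      · simpa [PySem.Chars.lstrip, List.dropWhile_cons, hs, PySem.Chars.split₀,
          PySem.Chars.split₀.go] using ih
      · simp [PySem.Chars.lstrip, hs]
  have hr : ∀ ds : List Char,
      PySem.Chars.split₀ (PySem.Chars.rstrip ds) = PySem.Chars.split₀ ds := by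
    intro ds
    have hdec : ds = PySem.Chars.rstrip ds ++ (ds.reverse.takeWhile PySem.Chars.isspace).reverse := by
      unfold PySem.Chars.rstrip
      rw [← List.reverse_append, List.takeWhile_append_dropWhile, List.reverse_reverse]
    have ht : ∀ c ∈ (ds.reverse.takeWhile PySem.Chars.isspace).reverse,
        PySem.Chars.isspace c = true := by
      intro c hc
      exact List.mem_takeWhile_imp (List.mem_reverse.mp hc)
    conv_rhs => rw [hdec]
    unfold PySem.Chars.split₀
    rw [pv_go_append_spaces _ _ ht]
  rw [PySem.Chars.strip, hr, hl]

-- the word split₀ produces at the front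
theorem pv_split₀_word (w : List Char) (hne : w ≠ [])
    (hw : ∀ c ∈ w, PySem.Chars.isspace c = false) (rest : List Char) (hr : pvHeadWS rest) :
    PySem.Chars.split₀ (w ++ rest) = w :: PySem.Chars.split₀ rest := by
  unfold PySem.Chars.split₀
  rw [pv_go_word w hw rest [] []]
  cases rest with
  | nil =>
    simp [PySem.Chars.split₀.go, List.isEmpty_iff, hne]
  | cons d r =>
    have hd : PySem.Chars.isspace d = true := hr
    simp only [PySem.Chars.split₀.go, hd, if_true, List.append_nil,
      List.reverse_reverse, List.isEmpty_nil]
    rw [pv_go_acc r [] [w]]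
    simp [hne]

-- ---- the machine on one word ----

theorem pvM_tail (m : List Char) (hne : m ≠ [])
    (hm : ∀ c ∈ m, PySem.Chars.isspace c = false) (rest : List Char) (hr : pvHeadWS rest) :
    pvM (m ++ rest) false =
      (m ++ (pvM rest true).1,
       (List.replicate (m.length - 1) "-I" ++ ["-E"]) ++ (pvM rest true).2) := by
  revert hm
  induction m with
  | nil => exact absurd rfl hne
  | cons e m' ih =>
    intro hm
    have he : PySem.Chars.isspace e = false := hm e (by simp)
    cases m' with
    | nil =>
      cases rest with
      | nil => simp [pvM, he]
      | cons d r =>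
        have hd : PySem.Chars.isspace d = true := hr
        simp [pvM, he, hd]
    | cons f m'' =>
      have hf : PySem.Chars.isspace f = false := hm f (by simp)
      have ihr := ih (by simp) (fun d hd => hm d (List.mem_cons_of_mem e hd))
      simp only [List.cons_append] at ihr ⊢
      have step : pvM (e :: (f :: (m'' ++ rest))) false
          = (e :: (pvM (f :: (m'' ++ rest)) false).1,
             "-I" :: (pvM (f :: (m'' ++ rest)) false).2) := by
        simp [pvM, he, hf]
      rw [step, ihr]
      simp [List.replicate_succ]

theorem pvM_word (w : List Char) (hne : w ≠ [])
    (hw : ∀ c ∈ w, PySem.Chars.isspace c = false) (rest : List Char) (hr : pvHeadWS rest) :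
    pvM (w ++ rest) true = (w ++ (pvM rest true).1, pvPat w ++ (pvM rest true).2) := by
  cases w with
  | nil => exact absurd rfl hne
  | cons c m =>
    have hc : PySem.Chars.isspace c = false := hw c (by simp)
    cases m with
    | nil =>
      cases rest with
      | nil => simp [pvM, pvPat, hc]
      | cons d r =>
        have hd : PySem.Chars.isspace d = true := hr
        simp [pvM, pvPat, hc, hd]
    | cons f m' =>
      have hf : PySem.Chars.isspace f = false := hw f (by simp)
      have htail := pvM_tail (f :: m') (by simp) (fun d hd => hw d (List.mem_cons_of_mem c hd))
        rest hr
      simp only [List.cons_append] at htail ⊢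
      have step : pvM (c :: (f :: (m' ++ rest))) true
          = (c :: (pvM (f :: (m' ++ rest)) false).1,
             "-B" :: (pvM (f :: (m' ++ rest)) false).2) := by
        simp [pvM, hc, hf]
      rw [step, htail]
      simp [pvPat]

-- ---- the machine equals the split-based computation ----

theorem pv_join_nil_cons (w : List Char) (ws : List (List Char)) :
    PySem.Chars.join [] (w :: ws) = w ++ PySem.Chars.join [] ws := by
  cases ws with
  | nil => simp [PySem.Chars.join_singleton, PySem.Chars.join_nil]
  | cons v vs => simp [PySem.Chars.join_cons_cons]

theorem pvM_split₀ : ∀ (n : Nat) (cs : List Char), cs.length ≤ n →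
    pvM cs true = (PySem.Chars.join [] (PySem.Chars.split₀ cs),
                   (PySem.Chars.split₀ cs).flatMap pvPat) := by
  intro n
  induction n with
  | zero =>
    intro cs h
    have : cs = [] := List.eq_nil_of_length_eq_zero (Nat.le_zero.mp h)
    subst this
    simp [pvM, PySem.Chars.split₀, PySem.Chars.split₀.go, PySem.Chars.join_nil]
  | succ n ih =>
    intro cs h
    cases cs with
    | nil => simp [pvM, PySem.Chars.split₀, PySem.Chars.split₀.go, PySem.Chars.join_nil]
    | cons c rest =>
      by_cases hs : PySem.Chars.isspace c
      · have h1 : pvM (c :: rest) true = pvM rest true := by simp [pvM, hs]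
        have h2 : PySem.Chars.split₀ (c :: rest) = PySem.Chars.split₀ rest := by
          simp [PySem.Chars.split₀, PySem.Chars.split₀.go, hs]
        rw [h1, h2]
        exact ih rest (by simpa using Nat.le_of_succ_le_succ h)
      · -- a word starts: c :: takeWhile nonspace rest, then dropWhile
        have hsf : PySem.Chars.isspace c = false := by simpa using hs
        set P : Char → Bool := fun d => !PySem.Chars.isspace d with hP
        have hdecomp : c :: rest = (c :: rest.takeWhile P) ++ rest.dropWhile P := by
          simp [List.takeWhile_append_dropWhile]
        have hwword : ∀ d ∈ c :: rest.takeWhile P, PySem.Chars.isspace d = false := by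
          intro d hd
          rcases List.mem_cons.mp hd with h' | h'
          · subst h'; exact hsf
          · have := List.mem_takeWhile_imp h'
            simpa [hP] using this
        have hrest : pvHeadWS (rest.dropWhile P) := by
          cases hdw : rest.dropWhile P with
          | nil => trivial
          | cons d r =>
            have := List.head?_dropWhile_not P rest
            rw [hdw] at this
            simp only [List.head?_cons] at this
            have : P d = false := by simpa using this
            simpa [hP] using this
        have hlen : (rest.dropWhile P).length ≤ n := by
          have h1 : (rest.dropWhile P).length ≤ rest.length := List.length_dropWhile_le _ _
          have h2 : rest.length ≤ n := by simpa using Nat.le_of_succ_le_succ h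
          omega
        rw [hdecomp, pvM_word _ (by simp) hwword _ hrest,
          pv_split₀_word _ (by simp) hwword _ hrest, ih _ hlen]
        simp [pv_join_nil_cons]

-- B's port computes the machine's result
theorem pv_alt_eq (line : String) :
    parse_seg_alt line
      = (String.ofList (pvM line.toList true).1, (pvM line.toList true).2) := by
  unfold parse_seg_alt
  obtain ⟨b, hb⟩ := pv_fold_eq_M line.toList line.toList [] rfl [] [] true
  simp only [List.length_nil, Nat.cast_zero, List.nil_append] at hb
  simp only [PySem.Str.len_eq]
  rw [hb]

-- A's port computes the machine's result too
theorem pv_a_eq (line : String) :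
    parse_seg line
      = (String.ofList (pvM line.toList true).1, (pvM line.toList true).2) := by
  simp only [parse_seg]
  have hW : (PySem.Str.split₀ (PySem.Str.strip line)).map String.toList
      = PySem.Chars.split₀ line.toList := by
    rw [PySem.Str.split₀_map_toList, PySem.Str.toList_strip, pv_split₀_strip]
  have hM := pvM_split₀ line.toList.length line.toList le_rfl
  rw [hM, Prod.mk.injEq]
  constructor
  · -- joined characters
    have h1 : (PySem.Str.join "" (PySem.Str.split₀ (PySem.Str.strip line))).toList
        = PySem.Chars.join [] (PySem.Chars.split₀ line.toList) := by
      rw [PySem.Str.toList_join, hW]; rfl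
    have h2 := congrArg String.ofList h1
    simp only [String.ofList_toList] at h2
    simpa using h2
  · -- tags
    have hcong : (PySem.Str.split₀ (PySem.Str.strip line)).foldl
        (fun tags word =>
          if PySem.Str.len word = 1 then tags ++ ["-S"]
          else tags ++ (["-B"] ++ List.replicate (PySem.Str.len word - 2).toNat "-I" ++ ["-E"]))
        []
        = (PySem.Str.split₀ (PySem.Str.strip line)).foldl
        (fun tags word => tags ++ pvPat word.toList) [] := by
      apply PySem.List.foldl_congr_mem
      intro acc w _
      by_cases h1 : w.length = 1
      · simp [pvPat, h1]
      · have h2 : ¬ ((w.length : Int) = 1) := by exact_mod_cast h1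
        have h3 : ((w.length : Int) - 2).toNat = w.length - 2 := by omega
        simp [pvPat, h1, h2, h3]
    rw [hcong, PySem.List.foldl_append_eq_flatMap]
    have hfm : (PySem.Str.split₀ (PySem.Str.strip line)).flatMap (fun w => pvPat w.toList)
        = (PySem.Chars.split₀ line.toList).flatMap pvPat := by
      rw [← hW, List.flatMap_map]
    simp [hfm]

-- ===== VERDICT (by name: the statement is the Claim_ definition above) =====
theorem parse_seg_spec : Claim_equal_parse_seg := by
  intro line _
  unfold Spec_parse_seg
  rw [pv_a_eq, pv_alt_eq]
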